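-- pv_equiv track=rewrite | github.com/pypi-data/pypi-mirror-279 | packages/matching-statistics/matching_statistics-0.3.0-py3-none-any.whl/tests/test_matching_statistics.py | naive_matching_statistics
-- ===== SOURCE A (Python) =====
-- def naive_matching_statistics(input_string, input_pattern):
--     """
--     Compute the Matching Statistics using the Naive Algorithm.
--
--     input:
--         input_string: the large text
--         input_pattern: the string for which matching statistics needs to be calculated
--     output:
--         MS_TABLE: Matching statistics table containing the first occurrence & length of the maximal-exact-match of each suffix in pattern
--     """
--     MS_TABLE = dict()
--
--     for i in range(len(input_pattern)):
--         max_match_length = 0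
--         max_match_index = None
--
--         for j in range(len(input_string)):
--             curr_match_length = 0
--
--             while (j + curr_match_length < len(input_string) and
--                    i + curr_match_length < len(input_pattern) and
--                    input_string[j + curr_match_length] == input_pattern[i + curr_match_length]):
--                 curr_match_length += 1
--
--             if curr_match_length > max_match_length:
--                 max_match_length = curr_match_length
--                 max_match_index = j
--
--         MS_TABLE[i] = (max_match_index, max_match_length)
--
--     return MS_TABLE
-- ===== SOURCE B (Python) =====
-- def naive_matching_statistics(input_string, input_pattern):
--     """DP re-implementation: longest common extension table computed bottom-up
--     (lce[j] for suffix i from lce row of suffix i+1), O(n*m) instead of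
--     re-scanning character by character for every (i, j) pair."""
--     s, p = input_string, input_pattern
--     n, m = len(s), len(p)
--     best = []
--     nxt = [0] * (n + 1)
--     for i in range(m - 1, -1, -1):
--         curr = [1 + nxt[j + 1] if s[j] == p[i] else 0 for j in range(n)] + [0]
--         max_len, max_idx = 0, None
--         for j in range(n):
--             if curr[j] > max_len:
--                 max_len, max_idx = curr[j], j
--         best.append((max_idx, max_len))
--         nxt = curr
--     best.reverse()
--     return {i: v for i, v in enumerate(best)}
-- ===== Notes on version B (the rewrite author's own statement) =====
-- stated objective: faster
-- what changed: Replaces A's character-by-character rescan of every (pattern position, text position) pair by a bottom-up dynamic program that derives the longest-common-extension row for pattern index i from the row for i+1, then takes the first maximum of each row.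
import Mathlib
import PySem

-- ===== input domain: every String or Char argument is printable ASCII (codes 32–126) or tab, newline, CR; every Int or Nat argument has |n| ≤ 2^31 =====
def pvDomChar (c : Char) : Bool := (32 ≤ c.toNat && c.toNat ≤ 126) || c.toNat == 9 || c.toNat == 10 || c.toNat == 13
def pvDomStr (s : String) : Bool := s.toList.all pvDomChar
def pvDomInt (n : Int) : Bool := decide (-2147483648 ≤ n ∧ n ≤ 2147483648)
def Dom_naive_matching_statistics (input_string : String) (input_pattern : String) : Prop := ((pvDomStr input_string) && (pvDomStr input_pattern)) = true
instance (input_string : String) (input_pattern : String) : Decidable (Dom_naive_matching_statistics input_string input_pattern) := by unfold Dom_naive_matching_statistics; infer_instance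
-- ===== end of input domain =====

-- B replaces A's per-(i,j) character-by-character rescans by a bottom-up dynamic
-- programming on longest-common-extension rows (row i computed from row i+1).

-- ===== PORT A =====
-- the inner 'while' of A (short-circuit 'and' as nested ifs): extends the match
-- at text position j / pattern position i, current extension c
def aMatch (s p : List Char) (j i c : Nat) : Nat :=
  if hj : j + c < s.length then
    if hi : i + c < p.length then
      if s[j + c] = p[i + c] then aMatch s p j i (c + 1) else c
    else c
  else c
termination_by s.length - (j + c)
decreasing_by omega

-- the inner 'for j' loop of A: state (max_match_length, max_match_index)
def aInner (s p : List Char) (i : Nat) : Nat × Option Int :=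
  (List.range s.length).foldl
    (fun (st : Nat × Option Int) j =>
      if st.1 < aMatch s p j i 0 then (aMatch s p j i 0, some (j : Int)) else st)
    (0, none)

def naive_matching_statistics (input_string : String) (input_pattern : String) :
    List (Int × Option Int × Int) :=
  let s := input_string.toList
  let p := input_pattern.toList
  ((List.range p.length).foldl (fun d i =>
      d.insert (i : Int) ((aInner s p i).2, ((aInner s p i).1 : Int)))
    PySem.Dict.empty).items

-- ===== PORT B =====
-- the LCE row for pattern index i, from the row for i+1 (nxt has length s.length+1;
-- all getD indices are in range, so getD is exact for Python's list indexing here)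
def bRow (s p : List Char) (i : Nat) (nxt : List Nat) : List Nat :=
  ((List.range s.length).map (fun j =>
      if s.getD j ' ' = p.getD i ' ' then 1 + nxt.getD (j + 1) 0 else 0)) ++ [0]

-- first maximum of curr over j in range(len(s)), as (max_len, max_idx)
def bBest (s : List Char) (curr : List Nat) : Nat × Option Int :=
  (List.range s.length).foldl
    (fun (t : Nat × Option Int) j =>
      if t.1 < curr.getD j 0 then (curr.getD j 0, some (j : Int)) else t) (0, none)

def naive_matching_statistics_alt (input_string : String) (input_pattern : String) :
    List (Int × Option Int × Int) :=
  let s := input_string.toList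
  let p := input_pattern.toList
  let st := (List.range p.length).reverse.foldl
    (fun (st : List Nat × List (Option Int × Int)) i =>
      (bRow s p i st.1,
       st.2 ++ [((bBest s (bRow s p i st.1)).2, ((bBest s (bRow s p i st.1)).1 : Int))]))
    (List.replicate (s.length + 1) 0, [])
  let best := st.2.reverse
  ((PySem.List.enumerate best 0).foldl (fun d q => d.insert q.1 q.2) PySem.Dict.empty).items

-- ===== PRECONDITION & SPEC =====
def Spec_naive_matching_statistics (input_string : String) (input_pattern : String) (out : List (Int × Option Int × Int)) : Prop := out = naive_matching_statistics_alt input_string input_pattern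
instance (input_string : String) (input_pattern : String) (out : List (Int × Option Int × Int)) : Decidable (Spec_naive_matching_statistics input_string input_pattern out) := by unfold Spec_naive_matching_statistics; infer_instance

-- ===== CLAIM (what is proved, stated in full; the proofs are below) =====
def Claim_equal_naive_matching_statistics : Prop := ∀ (input_string : String) (input_pattern : String), Dom_naive_matching_statistics input_string input_pattern → Spec_naive_matching_statistics input_string input_pattern (naive_matching_statistics input_string input_pattern)

-- ===== LEMMAS AND PROOFS =====

-- length of the longest common prefix of s[j:] and p[i:] (the common value)
def mLen (s p : List Char) (j i : Nat) : Nat :=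
  if hj : j < s.length then
    if hi : i < p.length then
      if s[j] = p[i] then mLen s p (j + 1) (i + 1) + 1 else 0
    else 0
  else 0
termination_by s.length - j
decreasing_by omega

theorem mLen_text_end (s p : List Char) (j i : Nat) (h : s.length ≤ j) :
    mLen s p j i = 0 := by
  rw [mLen, dif_neg (by omega)]

theorem mLen_pattern_end (s p : List Char) (j i : Nat) (h : p.length ≤ i) :
    mLen s p j i = 0 := by
  rw [mLen]
  split
  · rw [dif_neg (by omega)]
  · rfl

theorem aMatch_eq (s p : List Char) (j i c : Nat) :
    aMatch s p j i c = c + mLen s p (j + c) (i + c) := by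
  rw [aMatch, mLen]
  split
  · split
    · split
      · rw [aMatch_eq s p j i (c + 1)]
        have e1 : j + (c + 1) = j + c + 1 := by omega
        have e2 : i + (c + 1) = i + c + 1 := by omega
        rw [e1, e2]; omega
      · omega
    · omega
  · omega
termination_by s.length - (j + c)
decreasing_by omega

-- the ideal LCE row for pattern index i
def idealRow (s p : List Char) (i : Nat) : List Nat :=
  (List.range (s.length + 1)).map (fun j => mLen s p j i)

theorem getD_idealRow (s p : List Char) (i j : Nat) (h : j < s.length + 1) :
    (idealRow s p i).getD j 0 = mLen s p j i := by
  unfold idealRow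
  rw [List.getD_eq_getElem _ _ (by simpa using h)]
  simp

theorem idealRow_init (s p : List Char) :
    List.replicate (s.length + 1) 0 = idealRow s p p.length := by
  symm
  unfold idealRow
  rw [List.eq_replicate_iff]
  refine ⟨by simp, ?_⟩
  intro b hb
  simp only [List.mem_map, List.mem_range] at hb
  obtain ⟨j, _, hj⟩ := hb
  rw [mLen_pattern_end s p j p.length (le_refl _)] at hj
  omega

theorem bRow_ideal (s p : List Char) (i : Nat) (hi : i < p.length) :
    bRow s p i (idealRow s p (i + 1)) = idealRow s p i := by
  unfold bRow
  conv_rhs => rw [idealRow, List.range_succ, List.map_append]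
  congr 1
  · apply List.map_congr_left
    intro j hj
    rw [List.mem_range] at hj
    rw [getD_idealRow s p (i + 1) (j + 1) (by omega)]
    rw [List.getD_eq_getElem s _ hj, List.getD_eq_getElem p _ hi]
    conv_rhs => rw [mLen]
    rw [dif_pos hj, dif_pos hi]
    split
    · omega
    · rfl
  · simp [mLen_text_end s p s.length i (le_refl _)]

-- per-index result value of B
def rV (s p : List Char) (i : Nat) : Option Int × Int :=
  ((bBest s (idealRow s p i)).2, ((bBest s (idealRow s p i)).1 : Int))

-- the descending main loop of B, characterised
theorem bLoop_ideal (s p : List Char) (k : Nat) (hk : k ≤ p.length)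
    (acc : List (Option Int × Int)) :
    (List.range k).reverse.foldl
      (fun (st : List Nat × List (Option Int × Int)) i =>
        (bRow s p i st.1,
         st.2 ++ [((bBest s (bRow s p i st.1)).2, ((bBest s (bRow s p i st.1)).1 : Int))]))
      (idealRow s p k, acc)
    = (idealRow s p 0, acc ++ ((List.range k).reverse.map (rV s p))) := by
  induction k generalizing acc with
  | zero => simp
  | succ k ih =>
    rw [List.range_succ, List.reverse_append]
    simp only [List.reverse_singleton, List.singleton_append, List.foldl_cons]
    rw [bRow_ideal s p k (by omega)]
    rw [ih (by omega)]
    simp [rV]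

theorem aInner_eq (s p : List Char) (i : Nat) :
    aInner s p i = bBest s (idealRow s p i) := by
  unfold aInner bBest
  apply PySem.List.foldl_congr_mem
  intro acc j hj
  rw [List.mem_range] at hj
  have h1 : aMatch s p j i 0 = mLen s p j i := by
    have := aMatch_eq s p j i 0
    simpa using this
  have h2 : (idealRow s p i).getD j 0 = mLen s p j i := getD_idealRow s p i j (by omega)
  rw [h1, h2]

theorem enumerate_map_range' (α : Type) (f : Nat → α) (k a : Nat) :
    PySem.List.enumerate ((List.range' a k).map f) (a : Int)
    = (List.range' a k).map (fun i : Nat => ((i : Int), f i)) := by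
  induction k generalizing a with
  | zero => simp
  | succ k ih =>
    rw [List.range'_succ]
    simp only [List.map_cons, PySem.List.enumerate_cons]
    congr 1
    have e : ((a : Int) + 1) = ((a + 1 : Nat) : Int) := by push_cast; ring
    rw [e, ih]

theorem natCast_injective : Function.Injective (fun i : Nat => (i : Int)) := by
  intro a b h
  simpa using h

theorem items_A (s p : List Char) :
    ((List.range p.length).foldl (fun d i =>
        d.insert (i : Int) ((aInner s p i).2, ((aInner s p i).1 : Int)))
      PySem.Dict.empty).items
    = (List.range p.length).map (fun i : Nat => ((i : Int), rV s p i)) := by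
  rw [PySem.Dict.items_foldl_insert_fresh
      (l := List.range p.length)
      (k := fun i : Nat => (i : Int))
      (v := fun i => (((aInner s p i).2, ((aInner s p i).1 : Int)) : Option Int × Int))
      (d := PySem.Dict.empty)
      (by intro a _; simp [PySem.Dict.contains_empty])
      ((List.nodup_range).map natCast_injective)]
  rw [show (PySem.Dict.empty : PySem.Dict Int (Option Int × Int)).items = [] from rfl,
      List.nil_append]
  apply List.map_congr_left
  intro i _
  rw [aInner_eq]
  rfl

theorem items_B (best : List (Option Int × Int)) :
    ((PySem.List.enumerate best 0).foldl (fun d q => d.insert q.1 q.2)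
      PySem.Dict.empty).items
    = PySem.List.enumerate best 0 := by
  rw [PySem.Dict.items_foldl_insert_fresh
      (l := PySem.List.enumerate best 0)
      (k := fun q : Int × Option Int × Int => q.1)
      (v := fun q : Int × Option Int × Int => q.2)
      (d := PySem.Dict.empty)
      (by intro a _; simp [PySem.Dict.contains_empty])
      (by
        rw [show (fun q : Int × Option Int × Int => q.1) = (fun x : Int × Option Int × Int => x.1) from rfl,
            PySem.List.map_fst_enumerate, PySem.List.pyRange_one]
        refine List.nodup_range.map ?_
        intro a b h
        simpa using h)]
  rw [show (PySem.Dict.empty : PySem.Dict Int (Option Int × Int)).items = [] from rfl,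
      List.nil_append]
  simp

-- ===== VERDICT (by name: the statement is the Claim_ definition above) =====
theorem naive_matching_statistics_spec : Claim_equal_naive_matching_statistics := by
  intro input_string input_pattern _
  unfold Spec_naive_matching_statistics
  unfold naive_matching_statistics naive_matching_statistics_alt
  simp only []
  set s := input_string.toList
  set p := input_pattern.toList
  rw [items_A s p, idealRow_init s p,
      bLoop_ideal s p p.length (le_refl _) [], items_B]
  rw [show ((idealRow s p 0,
        ([] : List (Option Int × Int)) ++ List.map (rV s p) (List.range p.length).reverse).2)
      = ([] ++ List.map (rV s p) (List.range p.length).reverse) from rfl]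
  rw [List.nil_append, ← List.map_reverse, List.reverse_reverse, List.range_eq_range']
  have h := enumerate_map_range' (Option Int × Int) (rV s p) p.length 0
  rw [Nat.cast_zero] at h
  exact h.symm
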